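-- pv_equiv track=rewrite | github.com/wlpinjlte/Algorithms-and-Datastructures | asd_dynamiki/zad1/zad1_jeszcze_raz.py | f
-- ===== SOURCE A (Python) =====
-- def f(S,i,j,F):
--     if i==j:
--         return 0
--     if F[i][j]!=-1:
--         return F[i][j]
--     if S[j]=="1":
--         F[i][j]=f(S,i,j-1,F)-1
--     else:
--         F[i][j]=f(S,i,j-1,F)+1
--     return F[i][j]
-- ===== SOURCE B (Python) =====
-- def f(S, i, j, F):
--     if i == j:
--         return 0
--     if F[i][j] != -1:
--         return F[i][j]
--     # scan down to the nearest already-cached cell (or the base i)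
--     k = j
--     while k != i and F[i][k] == -1:
--         k -= 1
--     acc = 0 if k == i else F[i][k]
--     # replay upward, filling the memo table exactly as the recursion would
--     while k != j:
--         k += 1
--         acc = acc - 1 if S[k] == "1" else acc + 1
--         F[i][k] = acc
--     return acc
-- ===== Notes on version B (the rewrite author's own statement) =====
-- stated objective: alternative
-- what changed: Replaces the memoized recursion by an iterative two-phase scan: walk k down from j to the first cached cell (or the base i), then replay upward accumulating +/-1 per character and filling the same memo cells; B performs the identical in-place writes to F, and the proved equivalence is about the return value.
-- outside the precondition, e.g. on f('01', -2, -1, [[-1, -1], [-1, -1]]): A returns -1, B returns -1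
import Mathlib
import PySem

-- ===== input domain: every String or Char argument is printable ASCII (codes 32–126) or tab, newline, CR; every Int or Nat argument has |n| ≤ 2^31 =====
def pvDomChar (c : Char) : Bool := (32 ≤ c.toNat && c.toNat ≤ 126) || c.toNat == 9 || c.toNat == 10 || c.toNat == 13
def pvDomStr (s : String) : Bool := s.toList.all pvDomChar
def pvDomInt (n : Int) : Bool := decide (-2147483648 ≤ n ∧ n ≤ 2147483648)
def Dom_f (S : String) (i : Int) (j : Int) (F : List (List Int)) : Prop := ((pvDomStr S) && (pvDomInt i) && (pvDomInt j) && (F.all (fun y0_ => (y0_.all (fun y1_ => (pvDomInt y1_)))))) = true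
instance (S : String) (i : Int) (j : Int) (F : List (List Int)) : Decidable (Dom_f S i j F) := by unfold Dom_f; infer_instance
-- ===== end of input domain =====

-- B replaces the memoized recursion by an iterative down-scan-then-replay; both Pythons mutate F
-- in place identically on Pre_; the equivalence proved here is about the RETURN value (the writes to
-- F never influence it, since every read happens before the corresponding write), so the ports
-- thread no table state.

-- ===== PORT A =====
-- fuel = (j - i).toNat suffices on Pre_ (the recursion descends one j per step); none = Python raises.
def fA : Nat → String → Int → Int → List (List Int) → Option Int
  | fuel, S, i, j, F =>
    if i == j then some 0
    else
      match PySem.List.pyGet? F i with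
      | none => none
      | some row =>
        match PySem.List.pyGet? row j with
        | none => none
        | some v =>
          if v != -1 then some v
          else
            match PySem.Str.pyGet? S j with
            | none => none
            | some c =>
              match fuel with
              | 0 => none
              | Nat.succ fu =>
                match fA fu S i (j-1) F with
                | none => none
                | some r => some (if c == '1' then r - 1 else r + 1)

def f (S : String) (i : Int) (j : Int) (F : List (List Int)) : Int :=
  (fA (j - i).toNat S i j F).getD 0

-- ===== PORT B =====
-- the downward scan of Source B: first k ≤ j with k == i or F[i][k] != -1 (fuel as above)
def scanDown : Nat → List Int → Int → Int → Int
  | fuel, row, i, k =>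
    if k == i then k
    else
      match PySem.List.pyGet? row k with
      | none => k   -- IndexError in Python; unreachable on Pre_
      | some v =>
        if v == -1 then
          match fuel with
          | 0 => k
          | Nat.succ fu => scanDown fu row i (k - 1)
        else k

-- one step of Source B's upward replay loop (the write F[i][k] = acc does not affect the result)
def stepf (S : String) (acc : Int) (k : Int) : Int :=
  if (PySem.Str.pyGet? S k).getD ' ' == '1' then acc - 1 else acc + 1

def f_alt (S : String) (i : Int) (j : Int) (F : List (List Int)) : Int :=
  if i == j then 0
  else
    match PySem.List.pyGet? F i with
    | none => 0   -- IndexError in Python; unreachable on Pre_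
    | some row =>
      match PySem.List.pyGet? row j with
      | none => 0
      | some v =>
        if v != -1 then v
        else
          let k0 := scanDown (j - i).toNat row i j
          let acc0 := if k0 == i then 0 else (PySem.List.pyGet? row k0).getD 0
          (PySem.List.pyRange (k0 + 1) (j + 1) 1).foldl (stepf S) acc0

-- ===== PRECONDITION & SPEC =====
-- Pre_ covers i = j, any in-range cached cell F[i][j] != -1 (returned untouched, negative indices
-- included), and the natural uncached domain 0 ≤ i < j < len(S): outside it A either raises or
-- returns only by recursing through Python's negative-index wraparound — an accident of the
-- representation, not part of the task.
def Pre_f (S : String) (i : Int) (j : Int) (F : List (List Int)) : Prop :=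
  i = j ∨
  (i ≠ j ∧ ((PySem.List.pyGet? F i).bind (fun row => PySem.List.pyGet? row j)).getD (-1) ≠ -1) ∨
  (0 ≤ i ∧ i < j ∧ j < (S.toList.length : Int) ∧ i < (F.length : Int) ∧
           j < ((F.getD i.toNat []).length : Int))
instance (S : String) (i : Int) (j : Int) (F : List (List Int)) : Decidable (Pre_f S i j F) := by
  unfold Pre_f; infer_instance

def pvWitness_f : String × Int × Int × List (List Int) := ("01", 0, 1, [[-1, -1]])

def Spec_f (S : String) (i : Int) (j : Int) (F : List (List Int)) (out : Int) : Prop := out = f_alt S i j F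
instance (S : String) (i : Int) (j : Int) (F : List (List Int)) (out : Int) : Decidable (Spec_f S i j F out) := by unfold Spec_f; infer_instance

-- ===== CLAIM (what is proved, stated in full; the proofs are below) =====
def Claim_equal_f : Prop := ∀ (S : String) (i : Int) (j : Int) (F : List (List Int)), Dom_f S i j F → Pre_f S i j F → Spec_f S i j F (f S i j F)

-- ===== LEMMAS AND PROOFS =====

lemma scanDown_bounds (row : List Int) (i : Int) :
    ∀ (fuel : Nat) (k : Int), i ≤ k → (k - i).toNat ≤ fuel →
      i ≤ scanDown fuel row i k ∧ scanDown fuel row i k ≤ k := by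
  intro fuel
  induction fuel with
  | zero =>
    intro k hik hf
    have hk : k = i := by omega
    subst hk
    simp [scanDown]
  | succ fu ih =>
    intro k hik hf
    by_cases hk : k = i
    · rw [scanDown]; simp [hk]
    · have hk2 : (k == i) = false := by simp [hk]
      rw [scanDown]
      simp only [hk2, Bool.false_eq_true, if_false]
      rcases hrow : PySem.List.pyGet? row k with _ | v
      · exact ⟨hik, le_rfl⟩
      · by_cases hv : v = -1
        · subst hv
          simp only [beq_self_eq_true, if_true]
          have := ih (k - 1) (by omega) (by omega)
          omega
        · have hv2 : (v == -1) = false := by simp [hv]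
          simp only [hv2, Bool.false_eq_true, if_false]
          exact ⟨hik, le_rfl⟩

lemma alt_step (S : String) (F : List (List Int)) (row : List Int) (i j : Int)
    (h0 : 0 ≤ i) (hij : i < j) (hS : j < (S.toList.length : Int))
    (hrow : PySem.List.pyGet? F i = some row) (hj : j < (row.length : Int))
    (hcache : PySem.List.pyGet? row j = some (-1)) :
    f_alt S i j F =
      (if (PySem.Str.pyGet? S j).getD ' ' == '1' then f_alt S i (j-1) F - 1
       else f_alt S i (j-1) F + 1) := by
  have hij' : (i == j) = false := by simp; omega
  have hji' : (j == i) = false := by simp; omega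
  obtain ⟨m, hm⟩ : ∃ m, (j - i).toNat = m + 1 := ⟨(j - 1 - i).toNat, by omega⟩
  have hm' : m = (j - 1 - i).toNat := by omega
  -- LHS reaches the scan branch and one scan step lands at j-1
  have hscan : scanDown ((j - i).toNat) row i j = scanDown m row i (j - 1) := by
    rw [hm, scanDown]
    simp [hji', hcache]
  have hLHS : f_alt S i j F =
      (PySem.List.pyRange (scanDown m row i (j - 1) + 1) (j + 1) 1).foldl (stepf S)
        (if scanDown m row i (j - 1) == i then 0
         else (PySem.List.pyGet? row (scanDown m row i (j - 1))).getD 0) := by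
    rw [f_alt]
    simp only [hij', Bool.false_eq_true, if_false, hrow, hcache]
    simp only [bne_self_eq_false, Bool.false_eq_true, if_false, hscan]
  by_cases h1 : j - 1 = i
  · -- base reached immediately
    have hk0 : scanDown m row i (j - 1) = i := by
      rw [scanDown.eq_def]
      simp [h1]
    have hrange : PySem.List.pyRange (i + 1) (j + 1) 1 = [j] := by
      have hj1 : j = i + 1 := by omega
      subst hj1
      simpa using PySem.List.pyRange_one_singleton (i + 1)
    rw [hLHS, hk0, hrange]
    have halt : f_alt S i (j - 1) F = 0 := by rw [f_alt]; simp [h1]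
    rw [halt]
    simp [stepf, List.foldl]
  · have h1' : ((j - 1 : Int) == i) = false := by simp; omega
    obtain ⟨v', hv'⟩ : ∃ v', PySem.List.pyGet? row (j - 1) = some v' :=
      ⟨_, PySem.List.pyGet?_eq_some_getElem row (by omega) (by omega)⟩
    have hijm : (i == (j - 1 : Int)) = false := by simp; omega
    by_cases hv : v' = -1
    · -- cache miss at j-1 too: both sides share the same stopping point k0
      have hk0b := scanDown_bounds row i m (j - 1) (by omega) (by omega)
      have hRHS : f_alt S i (j - 1) F =
          (PySem.List.pyRange (scanDown m row i (j - 1) + 1) ((j - 1) + 1) 1).foldl (stepf S)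
            (if scanDown m row i (j - 1) == i then 0
             else (PySem.List.pyGet? row (scanDown m row i (j - 1))).getD 0) := by
        rw [f_alt]
        subst hv
        simp only [hijm, Bool.false_eq_true, if_false, hrow, hv', bne_self_eq_false, hm']
      rw [hLHS, hRHS]
      have hsplit : PySem.List.pyRange (scanDown m row i (j - 1) + 1) (j + 1) 1 =
          PySem.List.pyRange (scanDown m row i (j - 1) + 1) j 1 ++ [j] := by
        have h2 := PySem.List.pyRange_one_succ_right
          (a := scanDown m row i (j - 1) + 1) (b := j) (by omega)
        simpa using h2
      rw [hsplit, List.foldl_append]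
      have h3 : ((j - 1 : Int) + 1) = j := by omega
      rw [h3]
      simp [stepf, List.foldl]
    · -- a cached cell sits at j-1
      have hk0 : scanDown m row i (j - 1) = j - 1 := by
        obtain ⟨m2, hm2⟩ : ∃ m2, m = m2 + 1 := ⟨(j - 2 - i).toNat, by omega⟩
        have hv2 : (v' == -1) = false := by simp [hv]
        rw [hm2, scanDown]
        simp [h1', hv', hv2]
      have hRHS : f_alt S i (j - 1) F = v' := by
        rw [f_alt]
        have hv3 : (v' != -1) = true := by simp [hv]
        simp [hijm, hrow, hv', hv3]
      rw [hLHS, hk0, hRHS]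
      have hrange : PySem.List.pyRange ((j - 1) + 1) (j + 1) 1 = [j] := by
        have h2 : ((j - 1 : Int) + 1) = j := by omega
        rw [h2]
        simpa using PySem.List.pyRange_one_singleton j
      rw [hrange]
      simp [h1', hv', stepf, List.foldl]

lemma fA_eq_alt (S : String) (F : List (List Int)) (row : List Int) :
    ∀ (n : Nat) (i j : Int), j = i + n → 0 ≤ i → j < (S.toList.length : Int) →
      PySem.List.pyGet? F i = some row → j < (row.length : Int) →
      fA n S i j F = some (f_alt S i j F) := by
  intro n
  induction n with
  | zero =>
    intro i j hji h0 hS hrow hj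
    have hij : j = i := by omega
    subst hij
    simp [fA, f_alt]
  | succ n ih =>
    intro i j hji h0 hS hrow hj
    have hij' : (i == j) = false := by simp; omega
    obtain ⟨v, hv⟩ : ∃ v, PySem.List.pyGet? row j = some v :=
      ⟨_, PySem.List.pyGet?_eq_some_getElem row (by omega) (by omega)⟩
    by_cases hv1 : v = -1
    · -- uncached: the recursion descends to j-1
      subst hv1
      obtain ⟨c, hc⟩ : ∃ c, PySem.Str.pyGet? S j = some c := by
        have hjn : j = ((j.toNat : Nat) : Int) := by omega
        rw [hjn, PySem.Str.pyGet?_natCast]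
        exact ⟨S.toList[j.toNat], by rw [List.getElem?_eq_getElem (by omega)]⟩
      have hrec := ih i (j - 1) (by omega) h0 (by omega) hrow (by omega)
      rw [fA]
      simp only [hij', Bool.false_eq_true, if_false, hrow, hv, bne_self_eq_false, hc, hrec]
      rw [alt_step S F row i j h0 (by omega) hS hrow hj hv]
      rw [hc]
      rfl
    · -- cached: both return the cell
      rw [fA]
      have hb : (v != -1) = true := by simp [hv1]
      simp only [hij', Bool.false_eq_true, if_false, hrow, hv, hb, if_true]
      have halt : f_alt S i j F = v := by
        rw [f_alt]
        simp [hij', hrow, hv, hb]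
      rw [halt]

-- ===== VERDICT (by name: the statement is the Claim_ definition above) =====
theorem f_spec : Claim_equal_f := by
  intro S i j F _ hpre
  unfold Spec_f
  rcases hpre with h | ⟨hne, hcached⟩ | ⟨h0, hij, hS, hF, hrow⟩
  · subst h
    simp [f, fA, f_alt]
  · -- cached cell: both return F[i][j] directly
    have hij' : (i == j) = false := by simp [hne]
    rcases hFi : PySem.List.pyGet? F i with _ | row
    · rw [hFi] at hcached; simp at hcached
    · rcases hrj : PySem.List.pyGet? row j with _ | v
      · simp only [hFi, Option.bind_some, hrj] at hcached; simp at hcached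
      · simp only [hFi, Option.bind_some, hrj, Option.getD_some] at hcached
        have hb : (v != -1) = true := by simp [hcached]
        rw [f, fA.eq_def]
        simp only [hij', Bool.false_eq_true, if_false, hFi, hrj, hb, if_true]
        rw [f_alt]
        simp [hij', hFi, hrj, hb]
  · have hget : PySem.List.pyGet? F i = some (F.getD i.toNat []) := by
      rw [PySem.List.pyGet?_eq_some_getElem (xs := F) h0 (by omega)]
      rw [List.getD_eq_getElem _ _ (by omega)]
    have := fA_eq_alt S F (F.getD i.toNat []) (j - i).toNat i j (by omega) h0 hS hget hrow
    rw [f, this]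
    rfl
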